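-- pv_equiv track=rewrite | github.com/deviant7/webmailExtensionUGAC | backend/api/views.py | build_stats
-- ===== SOURCE A (Python) =====
-- def build_stats(email_records, mailbox_total):
--     unread_count = sum(1 for record in email_records if record["status"] == "unread")
--     read_count = len(email_records) - unread_count
--     internal_records = [record for record in email_records if record["source"] == "internal"]
--     external_records = [record for record in email_records if record["source"] == "external"]
--
--     return {
--         "mailbox_total": mailbox_total,
--         "processed_total": len(email_records),
--         "total": len(email_records),
--         "unread": unread_count,
--         "read": read_count,
--         "internal_total": len(internal_records),
--         "external_total": len(external_records),
--         "internal_unread": sum(1 for record in internal_records if record["status"] == "unread"),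
--         "external_unread": sum(1 for record in external_records if record["status"] == "unread"),
--     }
-- ===== SOURCE B (Python) =====
-- def build_stats(email_records, mailbox_total):
--     total = unread = internal_total = internal_unread = external_total = external_unread = 0
--     for record in email_records:
--         total += 1
--         is_unread = record["status"] == "unread"
--         if is_unread:
--             unread += 1
--         source = record["source"]
--         if source == "internal":
--             internal_total += 1
--             if is_unread:
--                 internal_unread += 1
--         elif source == "external":
--             external_total += 1
--             if is_unread:
--                 external_unread += 1
--     return {
--         "mailbox_total": mailbox_total,
--         "processed_total": total,
--         "total": total,
--         "unread": unread,
--         "read": total - unread,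
--         "internal_total": internal_total,
--         "external_total": external_total,
--         "internal_unread": internal_unread,
--         "external_unread": external_unread,
--     }
-- ===== Notes on version B (the rewrite author's own statement) =====
-- stated objective: simpler
-- what changed: Replaces two generator-sum scans, two list comprehensions and their re-scans with a single loop maintaining six counters, deriving read as total - unread.
import Mathlib
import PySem

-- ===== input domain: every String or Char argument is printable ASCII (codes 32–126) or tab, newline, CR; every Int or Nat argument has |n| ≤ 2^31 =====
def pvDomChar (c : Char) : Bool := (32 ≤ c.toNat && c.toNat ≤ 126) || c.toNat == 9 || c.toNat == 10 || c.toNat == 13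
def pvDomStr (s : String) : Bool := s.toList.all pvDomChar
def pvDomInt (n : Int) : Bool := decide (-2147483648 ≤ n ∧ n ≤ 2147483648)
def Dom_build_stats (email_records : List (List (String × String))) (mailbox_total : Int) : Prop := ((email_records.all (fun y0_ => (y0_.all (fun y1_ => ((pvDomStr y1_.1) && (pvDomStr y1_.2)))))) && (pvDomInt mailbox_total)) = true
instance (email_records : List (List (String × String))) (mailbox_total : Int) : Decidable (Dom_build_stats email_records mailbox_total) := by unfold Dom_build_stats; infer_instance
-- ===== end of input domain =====

-- B replaces A's five passes (two generator sums, two comprehensions, re-scans) with one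
-- six-counter loop, deriving read = total - unread; objective: simpler (one pass, no lists).
-- Pre_ excludes records missing the "status" or "source" key, on which both Pythons raise KeyError.

-- ===== PORT A =====
-- record[k]: first match in the dict's insertion order; "" never occurs under Pre_ (key present).
def recGet (r : List (String × String)) (k : String) : String :=
  ((r.find? (fun p => p.1 == k)).map (·.2)).getD ""

def build_stats (email_records : List (List (String × String))) (mailbox_total : Int) : List (String × Int) :=
  let unread_count : Int :=
    email_records.foldl (fun a record => if recGet record "status" == "unread" then a + 1 else a) 0
  let read_count : Int := (email_records.length : Int) - unread_count
  let internal_records := email_records.filter (fun record => recGet record "source" == "internal")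
  let external_records := email_records.filter (fun record => recGet record "source" == "external")
  [("mailbox_total", mailbox_total),
   ("processed_total", (email_records.length : Int)),
   ("total", (email_records.length : Int)),
   ("unread", unread_count),
   ("read", read_count),
   ("internal_total", (internal_records.length : Int)),
   ("external_total", (external_records.length : Int)),
   ("internal_unread", internal_records.foldl (fun a record => if recGet record "status" == "unread" then a + 1 else a) 0),
   ("external_unread", external_records.foldl (fun a record => if recGet record "status" == "unread" then a + 1 else a) 0)]

-- ===== PORT B =====
-- one pass, state = (total, unread, internal_total, internal_unread, external_total, external_unread)
def bStep (s : Int × Int × Int × Int × Int × Int) (record : List (String × String)) :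
    Int × Int × Int × Int × Int × Int :=
  let (t, u, it, iu, et, eu) := s
  let isU := recGet record "status" == "unread"
  let u' := if isU then u + 1 else u
  let src := recGet record "source"
  if src == "internal" then
    (t + 1, u', it + 1, if isU then iu + 1 else iu, et, eu)
  else if src == "external" then
    (t + 1, u', it, iu, et + 1, if isU then eu + 1 else eu)
  else
    (t + 1, u', it, iu, et, eu)

def build_stats_alt (email_records : List (List (String × String))) (mailbox_total : Int) : List (String × Int) :=
  let (t, u, it, iu, et, eu) := email_records.foldl bStep (0, 0, 0, 0, 0, 0)
  [("mailbox_total", mailbox_total),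
   ("processed_total", t),
   ("total", t),
   ("unread", u),
   ("read", t - u),
   ("internal_total", it),
   ("external_total", et),
   ("internal_unread", iu),
   ("external_unread", eu)]

-- ===== PRECONDITION & SPEC =====
-- Pre_: every record contains both the "status" and the "source" key (else A raises KeyError,
-- and B, doing the same lookups, raises there too).
def Pre_build_stats (email_records : List (List (String × String))) (mailbox_total : Int) : Prop :=
  ∀ r ∈ email_records, (r.find? (fun p => p.1 == "status")).isSome ∧ (r.find? (fun p => p.1 == "source")).isSome
instance (email_records : List (List (String × String))) (mailbox_total : Int) : Decidable (Pre_build_stats email_records mailbox_total) := by unfold Pre_build_stats; infer_instance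
def pvWitness_build_stats : (List (List (String × String))) × Int :=
  ([[("status", "unread"), ("source", "internal")], [("status", "read"), ("source", "other")]], 5)

def Spec_build_stats (email_records : List (List (String × String))) (mailbox_total : Int) (out : List (String × Int)) : Prop := out = build_stats_alt email_records mailbox_total
instance (email_records : List (List (String × String))) (mailbox_total : Int) (out : List (String × Int)) : Decidable (Spec_build_stats email_records mailbox_total out) := by unfold Spec_build_stats; infer_instance

-- ===== CLAIM (what is proved, stated in full; the proofs are below) =====
def Claim_equal_build_stats : Prop := ∀ (email_records : List (List (String × String))) (mailbox_total : Int), Dom_build_stats email_records mailbox_total → Pre_build_stats email_records mailbox_total → Spec_build_stats email_records mailbox_total (build_stats email_records mailbox_total)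

-- ===== LEMMAS AND PROOFS =====

def cntU (l : List (List (String × String))) : Int :=
  l.foldl (fun a record => if recGet record "status" == "unread" then a + 1 else a) 0

theorem cntU_shift (l : List (List (String × String))) (a : Int) :
    l.foldl (fun a record => if recGet record "status" == "unread" then a + 1 else a) a = a + cntU l := by
  induction l generalizing a with
  | nil => simp [cntU]
  | cons r t ih =>
    simp only [cntU, List.foldl_cons]
    rw [ih, ih]
    split_ifs <;> ring

theorem cntU_cons (r : List (String × String)) (l : List (List (String × String))) :
    cntU (r :: l) = (if recGet r "status" == "unread" then (1:Int) else 0) + cntU l := by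
  conv_lhs => rw [cntU, List.foldl_cons]
  rw [cntU_shift]
  split_ifs <;> ring

theorem bFold_eq (l : List (List (String × String))) (t u it iu et eu : Int) :
    l.foldl bStep (t, u, it, iu, et, eu) =
      (t + (l.length : Int),
       u + cntU l,
       it + ((l.filter (fun record => recGet record "source" == "internal")).length : Int),
       iu + cntU (l.filter (fun record => recGet record "source" == "internal")),
       et + ((l.filter (fun record => recGet record "source" == "external")).length : Int),
       eu + cntU (l.filter (fun record => recGet record "source" == "external"))) := by
  induction l generalizing t u it iu et eu with
  | nil => simp [cntU]
  | cons r rest ih =>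
    have hne : (recGet r "source" == "internal") = true → (recGet r "source" == "external") = false := by
      simp only [beq_iff_eq, beq_eq_false_iff_ne]
      intro h; simp [h]
    by_cases hu : (recGet r "status" == "unread") = true <;>
      by_cases hi : (recGet r "source" == "internal") = true
    · have he := hne hi
      simp only [List.foldl_cons, List.filter_cons, bStep, hu, hi, he, if_true, if_false,
        Bool.false_eq_true]
      rw [ih]
      simp only [cntU_cons, hu, hi, he, List.length_cons, if_true, Prod.mk.injEq]
      and_intros <;> first | rfl | (push_cast; ring) | push_cast
    · by_cases he : (recGet r "source" == "external") = true
      · simp only [List.foldl_cons, List.filter_cons, bStep, hu, hi, he, if_true, if_false,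
          Bool.false_eq_true]
        rw [ih]
        simp only [cntU_cons, hu, hi, he, List.length_cons, if_true, Prod.mk.injEq]
        and_intros <;> first | rfl | (push_cast; ring) | push_cast
      · simp only [List.foldl_cons, List.filter_cons, bStep, hu, hi, he, if_true, if_false,
          Bool.false_eq_true]
        rw [ih]
        simp only [cntU_cons, hu, hi, he, List.length_cons, if_true, Prod.mk.injEq]
        and_intros <;> first | rfl | (push_cast; ring) | push_cast
    · have he := hne hi
      simp only [List.foldl_cons, List.filter_cons, bStep, hu, hi, he, if_true, if_false,
        Bool.false_eq_true]
      rw [ih]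
      simp only [cntU_cons, hu, hi, he, List.length_cons, if_false, Prod.mk.injEq,
        Bool.false_eq_true]
      and_intros <;> first | rfl | (push_cast; ring) | push_cast
    · by_cases he : (recGet r "source" == "external") = true
      · simp only [List.foldl_cons, List.filter_cons, bStep, hu, hi, he, if_true, if_false,
          Bool.false_eq_true]
        rw [ih]
        simp only [cntU_cons, hu, hi, he, List.length_cons, if_false, Prod.mk.injEq,
          Bool.false_eq_true]
        and_intros <;> first | rfl | (push_cast; ring) | push_cast
      · simp only [List.foldl_cons, List.filter_cons, bStep, hu, hi, he, if_true, if_false,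
          Bool.false_eq_true]
        rw [ih]
        simp only [cntU_cons, hu, hi, he, List.length_cons, if_false, Prod.mk.injEq,
          Bool.false_eq_true]
        and_intros <;> first | rfl | (push_cast; ring) | push_cast

-- ===== VERDICT (by name: the statement is the Claim_ definition above) =====
theorem build_stats_spec : Claim_equal_build_stats := by
  intro email_records mailbox_total _ _
  unfold Spec_build_stats build_stats build_stats_alt
  rw [bFold_eq]
  simp only [cntU, zero_add]
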